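-- pv_equiv track=rewrite | github.com/long01032000/Capstone_AI_Data_Dashboard | helpers/ai_insight.py | _pick_col_by_hint
-- ===== SOURCE A (Python) =====
-- def _pick_col_by_hint(all_cols, hint: str):
--     """Exact -> case-insensitive -> substring match."""
--     if not hint:
--         return None
--     h = hint.strip().lower()
--     for c in all_cols:
--         if c.lower() == h:
--             return c
--     for c in all_cols:
--         if h in c.lower():
--             return c
--     return None
-- ===== SOURCE B (Python) =====
-- def _pick_col_by_hint(all_cols, hint: str):
--     """Single pass: exact (case-insensitive) match wins immediately; first substring match kept as fallback."""
--     if not hint: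
--         return None
--     h = hint.strip().lower()
--     fallback = None
--     for c in all_cols:
--         cl = c.lower()
--         if cl == h:
--             return c
--         if fallback is None and h in cl:
--             fallback = c
--     return fallback
-- ===== Notes on version B (the rewrite author's own statement) =====
-- stated objective: simpler
-- what changed: Replaced A's two sequential scans of all_cols with one single pass that returns on exact match and records the first substring match as a fallback accumulator.
import Mathlib
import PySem

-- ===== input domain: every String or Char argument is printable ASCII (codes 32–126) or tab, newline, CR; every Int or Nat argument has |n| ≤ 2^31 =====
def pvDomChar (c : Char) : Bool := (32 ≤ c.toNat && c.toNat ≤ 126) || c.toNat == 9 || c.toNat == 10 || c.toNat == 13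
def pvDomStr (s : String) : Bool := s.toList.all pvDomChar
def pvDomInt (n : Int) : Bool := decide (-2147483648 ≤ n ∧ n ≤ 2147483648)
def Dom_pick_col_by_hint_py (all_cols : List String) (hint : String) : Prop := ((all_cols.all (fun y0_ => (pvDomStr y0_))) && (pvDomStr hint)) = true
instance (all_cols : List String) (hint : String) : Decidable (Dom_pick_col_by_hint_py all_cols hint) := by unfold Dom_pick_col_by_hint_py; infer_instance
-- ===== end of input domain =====

-- B replaces A's two sequential scans with one single pass keeping a substring-match fallback accumulator (simpler decomposition, same cost).


-- ===== PORT A =====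
-- first loop: first exact case-insensitive match
def pickA_exact (cols : List String) (h : String) : Option String :=
  match cols with
  | [] => none
  | c :: rest => if PySem.Str.lower c == h then some c else pickA_exact rest h

-- second loop: first substring match
def pickA_sub (cols : List String) (h : String) : Option String :=
  match cols with
  | [] => none
  | c :: rest => if PySem.Str.isIn h (PySem.Str.lower c) then some c else pickA_sub rest h

def pick_col_by_hint_py (all_cols : List String) (hint : String) : Option String :=
  if hint == "" then none
  else
    let h := PySem.Str.lower (PySem.Str.strip hint)
    match pickA_exact all_cols h with
    | some c => some c
    | none => pickA_sub all_cols h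

-- ===== PORT B =====
-- single pass with fallback accumulator
def pickB_loop (cols : List String) (h : String) (fallback : Option String) : Option String :=
  match cols with
  | [] => fallback
  | c :: rest =>
    let cl := PySem.Str.lower c
    if cl == h then some c
    else pickB_loop rest h (if fallback.isNone && PySem.Str.isIn h cl then some c else fallback)

def pick_col_by_hint_py_alt (all_cols : List String) (hint : String) : Option String :=
  if hint == "" then none
  else pickB_loop all_cols (PySem.Str.lower (PySem.Str.strip hint)) none

-- ===== PRECONDITION & SPEC =====
def Spec_pick_col_by_hint_py (all_cols : List String) (hint : String) (out : Option String) : Prop := out = pick_col_by_hint_py_alt all_cols hint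
instance (all_cols : List String) (hint : String) (out : Option String) : Decidable (Spec_pick_col_by_hint_py all_cols hint out) := by unfold Spec_pick_col_by_hint_py; infer_instance

-- ===== CLAIM (what is proved, stated in full; the proofs are below) =====
def Claim_equal_pick_col_by_hint_py : Prop := ∀ (all_cols : List String) (hint : String), Dom_pick_col_by_hint_py all_cols hint → Spec_pick_col_by_hint_py all_cols hint (pick_col_by_hint_py all_cols hint)

-- ===== LEMMAS AND PROOFS =====
-- invariant of B's single pass: exact match wins, else the accumulated fallback, else A's substring scan
theorem pickB_loop_eq (cols : List String) (h : String) (fb : Option String) :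
    pickB_loop cols h fb =
      match pickA_exact cols h with
      | some c => some c
      | none => match fb with
                | some x => some x
                | none => pickA_sub cols h := by
  induction cols generalizing fb with
  | nil => cases fb <;> simp [pickB_loop, pickA_exact, pickA_sub]
  | cons c rest ih =>
    simp only [pickB_loop, pickA_exact, pickA_sub]
    by_cases hx : PySem.Str.lower c == h
    · simp [hx]
    · simp only [hx]
      rw [ih]
      cases fb with
      | some x => simp
      | none =>
        cases hA : pickA_exact rest h with
        | some x => simp
        | none =>
          by_cases hs : PySem.Chars.isIn h.toList (PySem.Chars.lower c.toList) <;> simp [hs]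

-- ===== VERDICT (by name: the statement is the Claim_ definition above) =====
theorem pick_col_by_hint_py_spec : Claim_equal_pick_col_by_hint_py := by
  intro all_cols hint _
  unfold Spec_pick_col_by_hint_py pick_col_by_hint_py pick_col_by_hint_py_alt
  by_cases he : hint == ""
  · simp [he]
  · simp only [he]
    rw [pickB_loop_eq]
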